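-- pv_equiv track=rewrite | github.com/c0ntradicti0n/listalign | listalign/helpers.py | find_pos_at
-- ===== SOURCE A (Python) =====
-- from typing import List
--
-- def find_pos_at(seq: List[str], c_pos) -> str:
--     """
--     From a list of strings return the string before or after, given the positions
--
--
--     >>> find_pos_at("abc def gef hij".split(), 3)
--     (1, 0)
--     """
--
--
--     i = 0
--     for iw, w in enumerate(seq):
--         for ic,c in enumerate(w):
--             if i == c_pos:
--                 return iw, ic
--             i += 1
--
--     if i == c_pos:
--         return iw, ic
--
--     return -1, -1
-- ===== SOURCE B (Python) =====
-- from typing import List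
--
-- def find_pos_at(seq: List[str], c_pos) -> str:
--     # prefix sums of word lengths + binary search for the containing word (alternative strategy)
--     prefix = [0]
--     for w in seq:
--         prefix.append(prefix[-1] + len(w))
--     total = prefix[-1]
--     if 0 <= c_pos < total:
--         lo, hi = 0, len(seq) - 1
--         while lo < hi:
--             mid = (lo + hi) // 2
--             if prefix[mid + 1] > c_pos:
--                 hi = mid
--             else:
--                 lo = mid + 1
--         return lo, c_pos - prefix[lo]
--     return -1, -1
-- ===== Notes on version B (the rewrite author's own statement) =====
-- stated objective: alternative
-- what changed: Replaced A's flat character-by-character counting scan with prefix sums of the word lengths plus a binary search for the containing word.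
-- intended difference: When c_pos equals the total number of characters (and there is at least one character), A's trailing 'if i == c_pos' returns leftover loop state (len(seq)-1, last inner char index) — an accident of the implementation — while B returns the intended not-found value (-1, -1). — e.g. on find_pos_at(["ab"], 2): A returns [0, 1], B returns [-1, -1]
import Mathlib
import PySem

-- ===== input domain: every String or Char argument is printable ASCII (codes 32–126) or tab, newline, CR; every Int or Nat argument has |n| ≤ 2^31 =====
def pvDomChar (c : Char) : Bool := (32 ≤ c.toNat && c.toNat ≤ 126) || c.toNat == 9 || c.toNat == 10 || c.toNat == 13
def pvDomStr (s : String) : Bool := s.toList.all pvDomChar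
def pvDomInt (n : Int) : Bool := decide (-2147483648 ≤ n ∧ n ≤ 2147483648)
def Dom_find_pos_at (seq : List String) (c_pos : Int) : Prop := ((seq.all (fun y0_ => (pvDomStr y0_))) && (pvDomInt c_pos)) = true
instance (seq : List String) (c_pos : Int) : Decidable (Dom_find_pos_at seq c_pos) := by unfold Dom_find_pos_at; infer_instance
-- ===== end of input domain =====

-- B replaces A's character-by-character walk with prefix sums of the word lengths and a
-- binary search for the containing word (objective: alternative). On c_pos = total number
-- of characters A returns leftover loop state (see D_ below), where B returns (-1, -1).

-- ===== PORT A =====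
-- inner loop 'for ic, c in enumerate(w)': i counts flat chars, j is ic, ic0 the last bound ic
def fpaChars (iw j : Int) (cs : List Char) (i : Int) (ic0 : Option Int) (c_pos : Int) :
    (List Int) ⊕ (Int × Option Int) :=
  match cs with
  | [] => Sum.inr (i, ic0)
  | _ :: rest =>
      if i = c_pos then Sum.inl [iw, j]
      else fpaChars iw (j + 1) rest (i + 1) (some j) c_pos

-- outer loop 'for iw, w in enumerate(seq)'; iw0/ic0 model the Python locals iw/ic that may
-- be unbound at the trailing 'if i == c_pos' (none = Python NameError; excluded by Pre_)
def fpaWords (ws : List String) (iw i : Int) (iw0 ic0 : Option Int) (c_pos : Int) : List Int :=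
  match ws with
  | [] =>
      if i = c_pos then
        match iw0, ic0 with
        | some a, some b => [a, b]
        | _, _ => [-1, -1]  -- Python raises NameError here; excluded by Pre_
      else [-1, -1]
  | w :: rest =>
      match fpaChars iw 0 w.toList i ic0 c_pos with
      | Sum.inl r => r
      | Sum.inr (i', ic') => fpaWords rest (iw + 1) i' (some iw) ic' c_pos

def find_pos_at (seq : List String) (c_pos : Int) : List Int :=
  fpaWords seq 0 0 none none c_pos

-- ===== PORT B =====
-- prefix = [0]; for w in seq: prefix.append(prefix[-1] + len(w))
def fpaPrefix (seq : List String) (acc : Int) : List Int :=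
  match seq with
  | [] => [acc]
  | w :: rest => acc :: fpaPrefix rest (acc + PySem.Str.len w)

-- while lo < hi: mid = (lo+hi)//2; if prefix[mid+1] > c_pos: hi = mid else: lo = mid+1
-- (all indexing stays in range on every reachable call, so pyGetD's default is never used)
def fpaSearch (pre : List Int) (c_pos lo hi : Int) : Int :=
  if h : lo < hi then
    let mid := PySem.Int.floordiv (lo + hi) 2
    if c_pos < PySem.List.pyGetD pre (mid + 1) 0 then fpaSearch pre c_pos lo mid
    else fpaSearch pre c_pos (mid + 1) hi
  else lo
termination_by (hi - lo).toNat
decreasing_by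
  · have := PySem.Int.floordiv_two_mid_bounds (le_of_lt h)
    have hlt : PySem.Int.floordiv (lo + hi) 2 < hi := by
      rw [PySem.Int.floordiv_lt_iff_lt_mul (by omega : (0:Int) < 2)]; omega
    omega
  · have := PySem.Int.floordiv_two_mid_bounds (le_of_lt h)
    omega

def find_pos_at_alt (seq : List String) (c_pos : Int) : List Int :=
  let pre := fpaPrefix seq 0
  let total := PySem.List.pyGetD pre (-1) 0
  if 0 ≤ c_pos ∧ c_pos < total then
    let lo := fpaSearch pre c_pos 0 ((seq.length : Int) - 1)
    [lo, c_pos - PySem.List.pyGetD pre lo 0]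
  else [-1, -1]

-- ===== PRECONDITION & SPEC =====
-- total number of characters in the list (input inspection only)
def fpaTot (ws : List String) : Int := (ws.map (fun w => ((w.toList.length : Int)))).sum

-- Pre_ excludes exactly the inputs where A raises NameError: c_pos = 0 with no characters
-- at all (the trailing 'if' reads the never-bound loop variables iw/ic).
def Pre_find_pos_at (seq : List String) (c_pos : Int) : Prop :=
  ¬ (c_pos = 0 ∧ fpaTot seq = 0)
instance (seq : List String) (c_pos : Int) : Decidable (Pre_find_pos_at seq c_pos) := by
  unfold Pre_find_pos_at; infer_instance

def pvWitness_find_pos_at : List String × Int := (["ab", "c"], 1)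

-- On inputs with at least one character and c_pos equal to the total character count, A's
-- trailing 'if i == c_pos' returns leftover loop state (len(seq)-1, last inner index) — an
-- accident of the implementation — while B returns the intended not-found value (-1, -1).
def D_find_pos_at (seq : List String) (c_pos : Int) : Prop :=
  0 < fpaTot seq ∧ c_pos = fpaTot seq
instance (seq : List String) (c_pos : Int) : Decidable (D_find_pos_at seq c_pos) := by
  unfold D_find_pos_at; infer_instance

def Spec_find_pos_at (seq : List String) (c_pos : Int) (out : List Int) : Prop :=
  ¬ D_find_pos_at seq c_pos → out = find_pos_at_alt seq c_pos
instance (seq : List String) (c_pos : Int) (out : List Int) : Decidable (Spec_find_pos_at seq c_pos out) := by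
  unfold Spec_find_pos_at; infer_instance

def pvDiffWitness_find_pos_at : List String × Int := (["ab"], 2)
def pvDiffWitnessOut_find_pos_at : (List Int) × (List Int) := ([0, 1], [-1, -1])

-- ===== CLAIM (what is proved, stated in full; the proofs are below) =====
def Claim_unchanged_find_pos_at : Prop := ∀ (seq : List String) (c_pos : Int), Dom_find_pos_at seq c_pos → Pre_find_pos_at seq c_pos → Spec_find_pos_at seq c_pos (find_pos_at seq c_pos)
def Claim_changed_find_pos_at : Prop := Dom_find_pos_at (pvDiffWitness_find_pos_at.1) (pvDiffWitness_find_pos_at.2) ∧ Pre_find_pos_at (pvDiffWitness_find_pos_at.1) (pvDiffWitness_find_pos_at.2) ∧ D_find_pos_at (pvDiffWitness_find_pos_at.1) (pvDiffWitness_find_pos_at.2) ∧ find_pos_at (pvDiffWitness_find_pos_at.1) (pvDiffWitness_find_pos_at.2) = pvDiffWitnessOut_find_pos_at.1 ∧ find_pos_at_alt (pvDiffWitness_find_pos_at.1) (pvDiffWitness_find_pos_at.2) = pvDiffWitnessOut_find_pos_at.2 ∧ pvDiffWitnessOut_find_pos_at.1 ≠ pvDiffWitnessOut_find_pos_at.2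
def Claim_exact_find_pos_at : Prop := ∀ (seq : List String) (c_pos : Int), Dom_find_pos_at seq c_pos → Pre_find_pos_at seq c_pos → D_find_pos_at seq c_pos → find_pos_at seq c_pos ≠ find_pos_at_alt seq c_pos

-- ===== LEMMAS AND PROOFS =====

-- reference function both sides are reduced to: walk words subtracting lengths
def refAux : List String → Int → Int → List Int
  | [], _, _ => [-1, -1]
  | w :: rest, iw, c =>
      if c < (w.toList.length : Int) then [iw, c]
      else refAux rest (iw + 1) (c - w.toList.length)

theorem fpaTot_nil : fpaTot [] = 0 := rfl
theorem fpaTot_cons (w : String) (rest : List String) :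
    fpaTot (w :: rest) = (w.toList.length : Int) + fpaTot rest := by
  simp [fpaTot]

theorem fpaTot_nonneg (ws : List String) : 0 ≤ fpaTot ws := by
  induction ws with
  | nil => simp [fpaTot]
  | cons w rest ih => rw [fpaTot_cons]; positivity

-- A-side: inner loop hits c
theorem fpaChars_inl (cs : List Char) (iw j i : Int) (ic0 : Option Int) (c : Int)
    (h1 : i ≤ c) (h2 : c < i + cs.length) :
    fpaChars iw j cs i ic0 c = Sum.inl [iw, j + (c - i)] := by
  induction cs generalizing j i ic0 with
  | nil => simp at h2; omega
  | cons x rest ih =>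
      simp only [fpaChars]
      by_cases hic : i = c
      · simp [hic]
      · have hx : c < i + 1 + (rest.length : Int) := by
          simp only [List.length_cons] at h2; push_cast at h2; omega
        rw [if_neg hic, ih (j + 1) (i + 1) (some j) (by omega) hx]
        simp only [Sum.inl.injEq, List.cons.injEq, and_true, true_and]
        omega

-- A-side: inner loop misses
theorem fpaChars_inr (cs : List Char) (iw j i : Int) (ic0 : Option Int) (c : Int)
    (h : c < i ∨ i + cs.length ≤ c) :
    fpaChars iw j cs i ic0 c =
      Sum.inr (i + cs.length, if cs.isEmpty then ic0 else some (j + cs.length - 1)) := by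
  induction cs generalizing j i ic0 with
  | nil => simp [fpaChars]
  | cons x rest ih =>
      simp only [fpaChars]
      have hic : i ≠ c := by
        simp only [List.length_cons] at h; push_cast at h; omega
      have hx : c < i + 1 ∨ (i + 1) + (rest.length : Int) ≤ c := by
        simp only [List.length_cons] at h; push_cast at h; omega
      rw [if_neg hic, ih (j + 1) (i + 1) (some j) hx]
      cases rest with
      | nil => simp
      | cons y r =>
          simp only [List.isEmpty_cons, List.length_cons, Sum.inr.injEq, Prod.mk.injEq,
            Option.some.injEq, Bool.false_eq_true, if_false]
          push_cast
          constructor <;> omega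

-- A-side: when c lands strictly inside the characters, A computes refAux
theorem fpaWords_eq_ref (ws : List String) (iw i : Int) (iw0 ic0 : Option Int) (c : Int)
    (h1 : i ≤ c) (h2 : c < i + fpaTot ws) :
    fpaWords ws iw i iw0 ic0 c = refAux ws iw (c - i) := by
  induction ws generalizing iw i iw0 ic0 with
  | nil => rw [fpaTot_nil] at h2; omega
  | cons w rest ih =>
      rw [fpaTot_cons] at h2
      simp only [fpaWords, refAux]
      by_cases hin : c < i + w.toList.length
      · rw [fpaChars_inl w.toList iw 0 i ic0 c h1 hin, if_pos (by omega)]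
        simp
      · have hge : i + (w.toList.length : Int) ≤ c := by omega
        rw [fpaChars_inr w.toList iw 0 i ic0 c (Or.inr hge)]
        dsimp only
        rw [ih (iw + 1) (i + w.toList.length) (some iw) _ hge (by omega)]
        rw [if_neg (by omega)]
        congr 1
        omega

-- A-side: c outside [i, i + total] → not found
theorem fpaWords_miss (ws : List String) (iw i : Int) (iw0 ic0 : Option Int) (c : Int)
    (h : c < i ∨ i + fpaTot ws < c) :
    fpaWords ws iw i iw0 ic0 c = [-1, -1] := by
  induction ws generalizing iw i iw0 ic0 with
  | nil =>
      rw [fpaTot_nil] at h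
      simp only [fpaWords]
      rw [if_neg (by omega)]
  | cons w rest ih =>
      rw [fpaTot_cons] at h
      have htn := fpaTot_nonneg rest
      have hwn : (0:Int) ≤ w.toList.length := by positivity
      simp only [fpaWords]
      rw [fpaChars_inr w.toList iw 0 i ic0 c (by omega)]
      dsimp only
      exact ih (iw + 1) (i + w.toList.length) _ _ (by omega)

-- A-side leftover state, all-empty tail
theorem fpaWords_empty_tail (ws : List String) (iw i a b : Int)
    (h0 : fpaTot ws = 0) :
    fpaWords ws iw i (some a) (some b) i =
      if ws.isEmpty then [a, b] else [iw + ws.length - 1, b] := by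
  induction ws generalizing iw a with
  | nil => simp [fpaWords]
  | cons w rest ih =>
      rw [fpaTot_cons] at h0
      have htn := fpaTot_nonneg rest
      have hwn : (0:Int) ≤ w.toList.length := by positivity
      have hw0 : w.toList.length = 0 := by omega
      have hr0 : fpaTot rest = 0 := by omega
      simp only [fpaWords]
      rw [List.length_eq_zero_iff] at hw0
      rw [hw0]
      simp only [fpaChars]
      rw [ih (iw + 1) iw hr0]
      cases rest with
      | nil => simp
      | cons y r => simp; omega

-- A-side: at c = i + total with total > 0 the trailing 'if' fires with leftover iw/ic
theorem fpaWords_overflow (ws : List String) (iw i : Int) (iw0 ic0 : Option Int)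
    (hpos : 0 < fpaTot ws) :
    ∃ b, fpaWords ws iw i iw0 ic0 (i + fpaTot ws) = [iw + ws.length - 1, b] := by
  induction ws generalizing iw i iw0 ic0 with
  | nil => rw [fpaTot_nil] at hpos; omega
  | cons w rest ih =>
      rw [fpaTot_cons] at hpos ⊢
      have htn := fpaTot_nonneg rest
      have hwn : (0:Int) ≤ w.toList.length := by positivity
      simp only [fpaWords]
      rw [fpaChars_inr w.toList iw 0 i ic0 _ (by omega)]
      dsimp only
      by_cases hr : 0 < fpaTot rest
      · obtain ⟨b, hb⟩ := ih (iw + 1) (i + w.toList.length) (some iw)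
          (if w.toList.isEmpty then ic0 else some (0 + w.toList.length - 1)) hr
        refine ⟨b, ?_⟩
        have : i + ((w.toList.length : Int) + fpaTot rest)
            = (i + w.toList.length) + fpaTot rest := by ring
        rw [this, hb]
        congr 1
        simp; omega
      · have hr0 : fpaTot rest = 0 := by omega
        have hwpos : 0 < (w.toList.length : Int) := by omega
        have hwne : ¬ w.toList.isEmpty := by
          simp [List.isEmpty_iff]; intro hc; rw [hc] at hwpos; simp at hwpos
        rw [if_neg hwne]
        have harg : i + ((w.toList.length : Int) + fpaTot rest) = i + w.toList.length := by omega
        rw [harg, fpaWords_empty_tail rest (iw + 1) (i + w.toList.length) iw _ hr0]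
        refine ⟨0 + (w.toList.length : Int) - 1, ?_⟩
        cases rest with
        | nil => simp
        | cons y r => simp; omega

-- B-side: prefix list facts
theorem fpaPrefix_length (ws : List String) (acc : Int) :
    (fpaPrefix ws acc).length = ws.length + 1 := by
  induction ws generalizing acc with
  | nil => simp [fpaPrefix]
  | cons w rest ih => simp [fpaPrefix, ih]

theorem fpaPrefix_getD (ws : List String) (acc : Int) (k : Nat) (hk : k ≤ ws.length) :
    (fpaPrefix ws acc).getD k 0 = acc + fpaTot (ws.take k) := by
  induction ws generalizing acc k with
  | nil =>
      have hk0 : k = 0 := by simpa using hk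
      subst hk0
      simp [fpaPrefix, fpaTot]
  | cons w rest ih =>
      cases k with
      | zero => simp [fpaPrefix, fpaTot]
      | succ k' =>
          simp only [fpaPrefix, List.getD_cons_succ]
          rw [ih (acc + PySem.Str.len w) k' (by simpa using hk)]
          rw [List.take_succ_cons, fpaTot_cons]
          have : PySem.Str.len w = (w.toList.length : Int) := by
            simp [PySem.Str.len]
          omega

theorem fpaPrefix_getLast (ws : List String) (acc : Int) (h : fpaPrefix ws acc ≠ []) :
    (fpaPrefix ws acc).getLast h = acc + fpaTot ws := by
  induction ws generalizing acc with
  | nil => simp [fpaPrefix, fpaTot]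
  | cons w rest ih =>
      have hne : fpaPrefix rest (acc + PySem.Str.len w) ≠ [] := by
        cases hr : fpaPrefix rest (acc + PySem.Str.len w) with
        | nil =>
            have := fpaPrefix_length rest (acc + PySem.Str.len w)
            rw [hr] at this; simp at this
        | cons a l => simp
      simp only [fpaPrefix]
      rw [List.getLast_cons hne, ih (acc + PySem.Str.len w) hne, fpaTot_cons]
      have hlw : PySem.Str.len w = (w.toList.length : Int) := by simp [PySem.Str.len]
      omega

theorem fpaPrefix_last (ws : List String) :
    PySem.List.pyGetD (fpaPrefix ws 0) (-1) 0 = fpaTot ws := by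
  have hne : fpaPrefix ws 0 ≠ [] := by
    intro hc
    have := fpaPrefix_length ws 0
    rw [hc] at this; simp at this
  rw [PySem.List.pyGetD_neg_one _ _ hne, fpaPrefix_getLast ws 0 hne]
  omega

-- B-side: binary search bracket invariant
theorem fpaSearch_spec (pre : List Int) (c : Int) (lo hi : Int)
    (hle : lo ≤ hi)
    (hlo : PySem.List.pyGetD pre lo 0 ≤ c)
    (hhi : c < PySem.List.pyGetD pre (hi + 1) 0) :
    lo ≤ fpaSearch pre c lo hi ∧ fpaSearch pre c lo hi ≤ hi ∧
      PySem.List.pyGetD pre (fpaSearch pre c lo hi) 0 ≤ c ∧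
      c < PySem.List.pyGetD pre (fpaSearch pre c lo hi + 1) 0 := by
  by_cases h : lo < hi
  · have hmid := PySem.Int.floordiv_two_mid_bounds (le_of_lt h)
    have hltm : PySem.Int.floordiv (lo + hi) 2 < hi := by
      rw [PySem.Int.floordiv_lt_iff_lt_mul (by omega : (0:Int) < 2)]; omega
    rw [fpaSearch, dif_pos h]
    dsimp only
    set mid := PySem.Int.floordiv (lo + hi) 2 with hm
    by_cases hc : c < PySem.List.pyGetD pre (mid + 1) 0
    · rw [if_pos hc]
      have := fpaSearch_spec pre c lo mid (by omega) hlo hc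
      omega
    · rw [if_neg hc]
      have := fpaSearch_spec pre c (mid + 1) hi (by omega) (by omega) hhi
      omega
  · have heq : lo = hi := by omega
    subst heq
    rw [fpaSearch, dif_neg h]
    omega
termination_by (hi - lo).toNat
decreasing_by
  · omega
  · omega

-- refAux given the bracketing word index
theorem refAux_of_bracket (ws : List String) (iw c : Int) (k : Nat)
    (hk : k < ws.length)
    (h1 : fpaTot (ws.take k) ≤ c) (h2 : c < fpaTot (ws.take (k + 1))) :
    refAux ws iw c = [iw + k, c - fpaTot (ws.take k)] := by
  induction ws generalizing iw c k with
  | nil => simp at hk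
  | cons w rest ih =>
      cases k with
      | zero =>
          rw [List.take_zero, fpaTot_nil] at h1
          rw [List.take_succ_cons, List.take_zero, fpaTot_cons, fpaTot_nil] at h2
          simp only [refAux]
          rw [if_pos (by omega)]
          rw [List.take_zero, fpaTot_nil]
          simp
      | succ k' =>
          rw [List.take_succ_cons, fpaTot_cons] at h1 h2 ⊢
          have htk := fpaTot_nonneg (rest.take k')
          have h1' : fpaTot (rest.take k') ≤ c - w.toList.length := by omega
          have h2' : c - w.toList.length < fpaTot (rest.take (k' + 1)) := by omega
          simp only [refAux]
          rw [if_neg (by omega)]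
          rw [ih (iw + 1) (c - w.toList.length) k' (by simpa using hk) h1' h2']
          simp only [List.cons.injEq, and_true]
          constructor <;> push_cast <;> omega

-- B-side: inside the character range B computes refAux
theorem alt_eq_ref (ws : List String) (c : Int) (h1 : 0 ≤ c) (h2 : c < fpaTot ws) :
    find_pos_at_alt ws c = refAux ws 0 c := by
  have hwne : ws ≠ [] := by
    intro hc; rw [hc, fpaTot_nil] at h2; omega
  have hn : 1 ≤ ws.length := by
    cases ws with | nil => exact absurd rfl hwne | cons _ _ => simp
  simp only [find_pos_at_alt]
  rw [fpaPrefix_last ws]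
  rw [if_pos ⟨h1, h2⟩]
  have hhiD : PySem.List.pyGetD (fpaPrefix ws 0) (((ws.length : Int) - 1) + 1) 0 = fpaTot ws := by
    have : ((ws.length : Int) - 1) + 1 = ((ws.length : Nat) : Int) := by omega
    rw [this, PySem.List.pyGetD_natCast]
    simpa using fpaPrefix_getD ws 0 ws.length (le_refl _)
  have hloD : PySem.List.pyGetD (fpaPrefix ws 0) 0 0 ≤ c := by
    have h0 : PySem.List.pyGetD (fpaPrefix ws 0) ((0:Nat):Int) 0 = 0 := by
      rw [PySem.List.pyGetD_natCast]
      simpa using fpaPrefix_getD ws 0 0 (by omega)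
    simpa using h0.le.trans h1
  have hs := fpaSearch_spec (fpaPrefix ws 0) c 0 ((ws.length : Int) - 1)
    (by omega) hloD (by rw [hhiD]; exact h2)
  set r := fpaSearch (fpaPrefix ws 0) c 0 ((ws.length : Int) - 1) with hr
  obtain ⟨hr0, hrhi, hrc1, hrc2⟩ := hs
  set k := r.toNat with hkdef
  have hkr : (k : Int) = r := by omega
  have hklt : k < ws.length := by omega
  have hgr : PySem.List.pyGetD (fpaPrefix ws 0) r 0 = fpaTot (ws.take k) := by
    rw [← hkr, PySem.List.pyGetD_natCast]
    simpa using fpaPrefix_getD ws 0 k (by omega)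
  have hgr1 : PySem.List.pyGetD (fpaPrefix ws 0) (r + 1) 0 = fpaTot (ws.take (k + 1)) := by
    have : r + 1 = ((k + 1 : Nat) : Int) := by omega
    rw [this, PySem.List.pyGetD_natCast]
    simpa using fpaPrefix_getD ws 0 (k + 1) (by omega)
  rw [refAux_of_bracket ws 0 c k hklt (by rw [← hgr]; exact hrc1) (by rw [← hgr1]; exact hrc2)]
  rw [hgr, ← hkr]
  simp

theorem alt_miss (ws : List String) (c : Int) (h : c < 0 ∨ fpaTot ws < c) :
    find_pos_at_alt ws c = [-1, -1] := by
  simp only [find_pos_at_alt]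
  rw [fpaPrefix_last ws, if_neg (by omega)]

theorem alt_at_total (ws : List String) (c : Int) (h : c = fpaTot ws) :
    find_pos_at_alt ws c = [-1, -1] := by
  simp only [find_pos_at_alt]
  rw [fpaPrefix_last ws, if_neg (by omega)]

-- ===== VERDICT (by name: the statement is the Claim_ definition above) =====
theorem find_pos_at_spec : Claim_unchanged_find_pos_at := by
  intro seq c_pos _hdom hpre hnd
  unfold Pre_find_pos_at at hpre
  unfold D_find_pos_at at hnd
  have htn := fpaTot_nonneg seq
  by_cases h1 : 0 ≤ c_pos
  · by_cases h2 : c_pos < fpaTot seq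
    · rw [alt_eq_ref seq c_pos h1 h2]
      unfold find_pos_at
      rw [fpaWords_eq_ref seq 0 0 none none c_pos h1 (by omega)]
      simp
    · have : fpaTot seq < c_pos := by
        rcases lt_or_eq_of_le (le_of_not_gt h2) with h | h
        · exact h
        · exfalso
          rcases eq_or_lt_of_le htn with h0 | h0
          · exact hpre ⟨by omega, by omega⟩
          · exact hnd ⟨h0, h.symm⟩
      rw [alt_miss seq c_pos (Or.inr this)]
      unfold find_pos_at
      rw [fpaWords_miss seq 0 0 none none c_pos (by omega)]
  · rw [alt_miss seq c_pos (Or.inl (by omega))]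
    unfold find_pos_at
    rw [fpaWords_miss seq 0 0 none none c_pos (by omega)]

theorem find_pos_at_changed : Claim_changed_find_pos_at := by
  unfold Claim_changed_find_pos_at; decide

theorem find_pos_at_tight : Claim_exact_find_pos_at := by
  intro seq c_pos _hdom _hpre hd
  obtain ⟨hpos, hc⟩ := hd
  unfold find_pos_at
  obtain ⟨b, hb⟩ := fpaWords_overflow seq 0 0 none none hpos
  rw [(by omega : c_pos = 0 + fpaTot seq), hb, alt_at_total seq _ (by omega)]
  have hn : 1 ≤ seq.length := by
    cases seq with
    | nil => rw [fpaTot_nil] at hpos; omega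
    | cons _ _ => simp
  intro hcontra
  have := List.head_eq_of_cons_eq hcontra
  omega
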